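-- pv_equiv track=rewrite | github.com/xiaodang-wang/UNSW | COMP9021 Principles of Programming/quiz1.py | determine_L3
-- ===== SOURCE A (Python) =====
-- def determine_L3(L):
--     exit_flag = 1
--     for x in range(len(L)):
--         if x < len(L)-1:
--             for y in range(x+1):
--                 M1 = L[y:len(L)-x+y]
--
--             # judge M1
--                 M2 = []
--                 M2 = sorted(set(M1))
--                 if M2[-1] - M2[0] == len(M2)-1:
--                     return M1
--                     #L_3 = M1
--                 # out of loops with flag
--                 # or use return
--                     exit_flag = 0
--                     break
--             if exit_flag == 0:
--                 break
--     #incase there is no consecutive numbers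
--         else:
--             L_3 = 'no consecutive numbers'
-- ===== SOURCE B (Python) =====
-- def determine_L3(L):
--     n = len(L)
--     best_len = 0
--     best_start = 0
--     for y in range(n):
--         seen = {L[y]}
--         lo = hi = L[y]
--         for e in range(y + 1, n):
--             v = L[e]
--             if v not in seen:
--                 seen.add(v)
--                 if v < lo:
--                     lo = v
--                 if v > hi:
--                     hi = v
--             if hi - lo == len(seen) - 1:
--                 length = e - y + 1
--                 if length > best_len:
--                     best_len = length
--                     best_start = y
--     if best_len == 0:
--         return None
--     return L[best_start:best_start + best_len]
-- ===== Notes on version B (the rewrite author's own statement) =====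
-- stated objective: faster
-- what changed: Instead of enumerating windows by decreasing length and sorting each window's distinct values, B makes one pass per start index, extending the window rightwards while maintaining the distinct-value set, min and max incrementally, keeps the longest (earliest-start) window whose distinct values are consecutive, and returns its slice at the end.
import Mathlib
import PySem

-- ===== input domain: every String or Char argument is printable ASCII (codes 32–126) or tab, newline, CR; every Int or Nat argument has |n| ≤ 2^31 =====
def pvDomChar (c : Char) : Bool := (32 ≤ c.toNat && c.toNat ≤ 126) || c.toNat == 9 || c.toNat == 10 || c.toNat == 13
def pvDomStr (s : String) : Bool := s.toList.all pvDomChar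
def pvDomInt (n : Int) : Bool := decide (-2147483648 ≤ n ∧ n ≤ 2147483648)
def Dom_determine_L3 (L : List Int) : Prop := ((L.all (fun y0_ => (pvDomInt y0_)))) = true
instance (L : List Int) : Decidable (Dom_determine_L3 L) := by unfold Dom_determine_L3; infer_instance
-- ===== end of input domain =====

-- B replaces A's sort-every-window search (length-descending) by one incremental min/max/distinct-set
-- pass per start index, keeping the longest qualifying window: an asymptotically faster algorithm.


-- ===== PORT A =====
-- inner loop: 'for y in range(x+1): M1 = L[y:len(L)-x+y]; M2 = sorted(set(M1)); if M2[-1]-M2[0]==len(M2)-1: return M1'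
-- (M2[-1]/M2[0] via pyGetD: M2 is nonempty on every reachable call, where pyGetD is exact)
def determine_L3_innerA (L : List Int) (x : Nat) : List Nat → Option (List Int)
  | [] => none
  | y :: ys =>
    let M1 := PySem.List.slice L (some (y : Int)) (some ((L.length : Int) - (x : Int) + (y : Int)))
    let M2 := PySem.List.sorted (PySem.Set.ofList M1) (fun v => v) false
    if PySem.List.pyGetD M2 (-1) 0 - PySem.List.pyGetD M2 0 0 = (M2.length : Int) - 1 then
      some M1
    else determine_L3_innerA L x ys

-- outer loop: 'for x in range(len(L)): if x < len(L)-1: … (else branch only sets a dead local)'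
def determine_L3_outerA (L : List Int) : List Nat → Option (List Int)
  | [] => none
  | x :: xs =>
    if (x : Int) < (L.length : Int) - 1 then
      match determine_L3_innerA L x (List.range (x + 1)) with
      | some r => some r
      | none => determine_L3_outerA L xs
    else determine_L3_outerA L xs

def determine_L3 (L : List Int) : Option (List Int) :=
  determine_L3_outerA L (List.range L.length)

-- ===== PORT B =====
-- body of 'for e in range(y+1, n)': state (seen, lo, hi, best_len, best_start)
def determine_L3_stepB (L : List Int) (y : Nat)
    (st : PySem.Set Int × Int × Int × Nat × Nat) (e : Nat) :
    PySem.Set Int × Int × Int × Nat × Nat :=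
  match st with
  | (seen, lo, hi, bl, bs) =>
    let v := L.getD e 0
    let (seen2, lo2, hi2) :=
      if PySem.Set.contains seen v then (seen, lo, hi)
      else (PySem.Set.add seen v, if v < lo then v else lo, if v > hi then v else hi)
    if hi2 - lo2 = PySem.Set.len seen2 - 1 then
      let length := e - y + 1
      if bl < length then (seen2, lo2, hi2, length, y) else (seen2, lo2, hi2, bl, bs)
    else (seen2, lo2, hi2, bl, bs)

-- body of 'for y in range(n)': seen = {L[y]}; lo = hi = L[y]; inner loop, then keep (best_len, best_start)
def determine_L3_rowB (L : List Int) (b : Nat × Nat) (y : Nat) : Nat × Nat :=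
  let v := L.getD y 0
  let r := (List.range' (y + 1) (L.length - (y + 1))).foldl
             (determine_L3_stepB L y) (PySem.Set.ofList [v], v, v, b.1, b.2)
  (r.2.2.2.1, r.2.2.2.2)

def determine_L3_alt (L : List Int) : Option (List Int) :=
  let b := (List.range L.length).foldl (determine_L3_rowB L) (0, 0)
  if b.1 = 0 then none
  else some (PySem.List.slice L (some (b.2 : Int)) (some ((b.2 : Int) + (b.1 : Int))))

-- ===== PRECONDITION & SPEC =====
def Spec_determine_L3 (L : List Int) (out : Option (List Int)) : Prop := out = determine_L3_alt L
instance (L : List Int) (out : Option (List Int)) : Decidable (Spec_determine_L3 L out) := by unfold Spec_determine_L3; infer_instance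

-- ===== CLAIM (what is proved, stated in full; the proofs are below) =====
def Claim_equal_determine_L3 : Prop := ∀ (L : List Int), Dom_determine_L3 L → Spec_determine_L3 L (determine_L3 L)


-- ===== LEMMAS AND PROOFS =====

-- the window of length `len` starting at `y`, read off by index (equals the slice when in range)
def pvWin (L : List Int) (y len : Nat) : List Int :=
  (List.range' y len).map (fun i => L.getD i 0)

-- the consecutive-distinct-values test, in B's min/max/distinct-count form
def pvGoodW (L : List Int) (y len : Nat) : Bool :=
  match pvWin L y len with
  | [] => false
  | a :: t => decide (t.foldl max a - t.foldl min a = ((PySem.Set.ofList (a :: t)).length : Int) - 1)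

-- a qualifying window: length ≥ 2, in range, passing the test
def pvGood (L : List Int) (y len : Nat) : Prop :=
  2 ≤ len ∧ y + len ≤ L.length ∧ pvGoodW L y len = true

theorem pvWin_cons (L : List Int) (y m : Nat) :
    pvWin L y (m + 1) = L.getD y 0 :: pvWin L (y + 1) m := by
  simp [pvWin, List.range'_succ]

theorem pvWin_concat (L : List Int) (y m : Nat) :
    pvWin L y (m + 1) = pvWin L y m ++ [L.getD (y + m) 0] := by
  simp [pvWin, List.range'_concat]

theorem slice_eq_win (L : List Int) (y len : Nat) (h : y + len ≤ L.length) :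
    PySem.List.slice L (some (y : Int)) (some ((y : Int) + (len : Int))) = pvWin L y len := by
  rw [PySem.List.slice_natCast_add]
  apply List.ext_getElem
  · simp [pvWin]; omega
  · intro i h1 h2
    simp only [pvWin, List.getElem_take, List.getElem_drop, List.getElem_map, List.getElem_range']
    rw [List.getD_eq_getElem]
    · simp
    · simp at h1; omega

theorem mem_le_getLast {l : List Int} (hp : l.Pairwise (· ≤ ·)) {x : Int} (hx : x ∈ l)
    (h : l ≠ []) : x ≤ l.getLast h := by
  induction l with
  | nil => cases hx
  | cons b u ih =>
    rcases List.pairwise_cons.mp hp with ⟨hb, hu⟩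
    cases u with
    | nil => simp at hx ⊢; omega
    | cons c w =>
      rw [List.getLast_cons (by simp)]
      rcases List.mem_cons.mp hx with rfl | hx'
      · exact hb _ (List.getLast_mem _)
      · exact ih hu hx' (by simp)

-- A's sorted-set test equals B's min/max/count test, on any nonempty window
theorem condA_iff (a : Int) (t : List Int) :
    (PySem.List.pyGetD (PySem.List.sorted (PySem.Set.ofList (a :: t)) (fun v => v) false) (-1) 0
      - PySem.List.pyGetD (PySem.List.sorted (PySem.Set.ofList (a :: t)) (fun v => v) false) 0 0
      = ((PySem.List.sorted (PySem.Set.ofList (a :: t)) (fun v => v) false).length : Int) - 1)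
    ↔ (t.foldl max a - t.foldl min a = ((PySem.Set.ofList (a :: t)).length : Int) - 1) := by
  have hsne : PySem.Set.ofList (a :: t) ≠ [] := by
    intro hnil
    have : a ∈ PySem.Set.ofList (a :: t) := (PySem.Set.mem_ofList _ _).mpr (by simp)
    rw [hnil] at this
    cases this
  have hM2ne : PySem.List.sorted (PySem.Set.ofList (a :: t)) (fun v => v) false ≠ [] := by
    intro hnil
    exact hsne ((PySem.List.sorted_eq_nil_iff _ _ _).mp hnil)
  obtain ⟨m, r, hM⟩ : ∃ m r,
      PySem.List.sorted (PySem.Set.ofList (a :: t)) (fun v => v) false = m :: r := by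
    cases hM : PySem.List.sorted (PySem.Set.ofList (a :: t)) (fun v => v) false with
    | nil => exact absurd hM hM2ne
    | cons m r => exact ⟨m, r, rfl⟩
  have hmemM2 : ∀ x, x ∈ PySem.List.sorted (PySem.Set.ofList (a :: t)) (fun v => v) false ↔
      x ∈ a :: t := by
    intro x
    rw [PySem.List.mem_sorted, PySem.Set.mem_ofList]
  -- the head of sorted(set(w)) is the minimum of w
  have hhead : m = t.foldl min a := by
    have hmin_mem : t.foldl min a ∈ a :: t := by
      rcases PySem.List.foldl_min_mem t a with h' | h'
      · rw [h']; simp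
      · exact List.mem_cons_of_mem _ h'
    have h1 : m ≤ t.foldl min a :=
      PySem.List.key_head_sorted_le _ (fun v => v) hM _ ((PySem.Set.mem_ofList _ _).mpr hmin_mem)
    have hmmem : m ∈ a :: t := (hmemM2 m).mp (by rw [hM]; simp)
    have h2 : t.foldl min a ≤ m := by
      rcases List.mem_cons.mp hmmem with rfl | h'
      · exact (PySem.List.foldl_min_le t m).1
      · exact (PySem.List.foldl_min_le t a).2 _ h'
    omega
  -- the last element of sorted(set(w)) is the maximum of w
  have hlast : (PySem.List.sorted (PySem.Set.ofList (a :: t)) (fun v => v) false).getLast hM2ne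
      = t.foldl max a := by
    have hmax_mem : t.foldl max a ∈ a :: t := by
      rcases PySem.List.foldl_max_mem t a with h' | h'
      · rw [h']; simp
      · exact List.mem_cons_of_mem _ h'
    have hpair : (PySem.List.sorted (PySem.Set.ofList (a :: t)) (fun v => v) false).Pairwise (· ≤ ·) :=
      PySem.List.sorted_pairwise _ _
    have h1 : t.foldl max a ≤
        (PySem.List.sorted (PySem.Set.ofList (a :: t)) (fun v => v) false).getLast hM2ne :=
      mem_le_getLast hpair ((hmemM2 _).mpr hmax_mem) hM2ne
    have hlmem : (PySem.List.sorted (PySem.Set.ofList (a :: t)) (fun v => v) false).getLast hM2ne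
        ∈ a :: t := (hmemM2 _).mp (List.getLast_mem hM2ne)
    have h2 : (PySem.List.sorted (PySem.Set.ofList (a :: t)) (fun v => v) false).getLast hM2ne
        ≤ t.foldl max a := by
      rcases List.mem_cons.mp hlmem with heq | h'
      · rw [heq]; exact (PySem.List.le_foldl_max t a).1
      · exact (PySem.List.le_foldl_max t a).2 _ h'
    omega
  rw [PySem.List.pyGetD_neg_one _ _ hM2ne, hlast, PySem.List.length_sorted, hM,
    PySem.List.pyGetD_zero_cons, hhead]

-- ---------- characterisation of A ----------

theorem innerA_range' (L : List Int) (x : Nat) (hxn : x + 1 < L.length) :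
    ∀ (k y0 : Nat), y0 + k = x + 1 →
    (determine_L3_innerA L x (List.range' y0 k) = none ∧
      ∀ y, y0 ≤ y → y < y0 + k → pvGoodW L y (L.length - x) = false)
    ∨ (∃ y', y0 ≤ y' ∧ y' < y0 + k ∧ pvGoodW L y' (L.length - x) = true ∧
        (∀ y, y0 ≤ y → y < y' → pvGoodW L y (L.length - x) = false) ∧
        determine_L3_innerA L x (List.range' y0 k) = some (pvWin L y' (L.length - x))) := by
  intro k
  induction k with
  | zero =>
    intro y0 hk
    left
    exact ⟨rfl, fun y h1 h2 => by omega⟩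
  | succ k ih =>
    intro y0 hk
    rw [List.range'_succ]
    simp only [determine_L3_innerA]
    have harg : (L.length : Int) - (x : Int) + (y0 : Int)
        = (y0 : Int) + ((L.length - x : Nat) : Int) := by omega
    have hcons := pvWin_cons L y0 (L.length - x - 1)
    rw [show L.length - x - 1 + 1 = L.length - x from by omega] at hcons
    have hgiff : (PySem.List.pyGetD
          (PySem.List.sorted (PySem.Set.ofList (pvWin L y0 (L.length - x))) (fun v => v) false) (-1) 0
        - PySem.List.pyGetD
          (PySem.List.sorted (PySem.Set.ofList (pvWin L y0 (L.length - x))) (fun v => v) false) 0 0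
        = ((PySem.List.sorted (PySem.Set.ofList (pvWin L y0 (L.length - x))) (fun v => v) false).length : Int) - 1)
        ↔ pvGoodW L y0 (L.length - x) = true := by
      rw [pvGoodW.eq_def, hcons, condA_iff]
      simp
    rw [harg, slice_eq_win L y0 (L.length - x) (by omega)]
    by_cases hg : pvGoodW L y0 (L.length - x) = true
    · rw [if_pos (hgiff.mpr hg)]
      right
      exact ⟨y0, le_refl _, by omega, hg, fun y h1 h2 => by omega, rfl⟩
    · rw [if_neg (fun hc => hg (hgiff.mp hc))]
      have hgf : pvGoodW L y0 (L.length - x) = false := by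
        cases hb : pvGoodW L y0 (L.length - x)
        · rfl
        · exact absurd hb hg
      rcases ih (y0 + 1) (by omega) with ⟨hnone, hall⟩ | ⟨yp, h1, h2, h3, h4, h5⟩
      · left
        refine ⟨hnone, fun y hy1 hy2 => ?_⟩
        by_cases hy0 : y = y0
        · rw [hy0]; exact hgf
        · exact hall y (by omega) (by omega)
      · right
        refine ⟨yp, by omega, by omega, h3, fun y hy1 hy2 => ?_, h5⟩
        by_cases hy0 : y = y0
        · rw [hy0]; exact hgf
        · exact h4 y (by omega) hy2

theorem outerA_range' (L : List Int) :
    ∀ (m x0 : Nat), m = L.length - x0 → x0 ≤ L.length →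
    (∀ y len, pvGood L y len → len + x0 ≤ L.length) →
    (determine_L3_outerA L (List.range' x0 m) = none ∧ ∀ y len, ¬ pvGood L y len)
    ∨ (∃ y' len', pvGood L y' len' ∧
        (∀ y len, pvGood L y len → len < len' ∨ (len = len' ∧ y' ≤ y)) ∧
        determine_L3_outerA L (List.range' x0 m) = some (pvWin L y' len')) := by
  intro m
  induction m with
  | zero =>
    intro x0 hm hx0 hscan
    left
    refine ⟨rfl, fun y len hgood => ?_⟩
    have h1 := hscan y len hgood
    have h2 := hgood.1
    omega
  | succ k ih =>
    intro x0 hm hx0 hscan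
    rw [List.range'_succ]
    simp only [determine_L3_outerA]
    rw [List.range_eq_range']
    by_cases hxlt : (x0 : Int) < (L.length : Int) - 1
    · rw [if_pos hxlt]
      have hx1 : x0 + 1 < L.length := by omega
      rcases innerA_range' L x0 hx1 (x0 + 1) 0 (by omega) with ⟨hnone, hall⟩ | ⟨yp, h1, h2, h3, h4, h5⟩
      · rw [hnone]
        have hscanN : ∀ y len, pvGood L y len → len + (x0 + 1) ≤ L.length := by
          intro y len hgood
          have ha := hscan y len hgood
          by_cases hlen : len = L.length - x0
          · exfalso
            have hy : y < x0 + 1 := by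
              have := hgood.2.1; have := hgood.1; omega
            have hf := hall y (by omega) (by omega)
            rw [← hlen, hgood.2.2] at hf
            cases hf
          · have := hgood.1; omega
        exact ih (x0 + 1) (by omega) (by omega) hscanN
      · rw [h5]
        right
        have hlen2 : 2 ≤ L.length - x0 := by omega
        have hgoodp : pvGood L yp (L.length - x0) := ⟨hlen2, by omega, h3⟩
        refine ⟨yp, L.length - x0, hgoodp, fun y len hgood => ?_, rfl⟩
        have ha := hscan y len hgood
        by_cases hlen : len = L.length - x0
        · right
          refine ⟨hlen, ?_⟩
          by_contra hlt
          have hy : y < yp := by omega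
          have hf := h4 y (by omega) (by omega)
          rw [← hlen, hgood.2.2] at hf
          cases hf
        · left; omega
    · rw [if_neg hxlt]
      have hscanN : ∀ y len, pvGood L y len → len + (x0 + 1) ≤ L.length := by
        intro y len hgood
        have ha := hscan y len hgood
        have := hgood.1
        omega
      exact ih (x0 + 1) (by omega) (by omega) hscanN

theorem charA (L : List Int) :
    (determine_L3 L = none ∧ ∀ y len, ¬ pvGood L y len)
    ∨ (∃ y' len', pvGood L y' len' ∧
        (∀ y len, pvGood L y len → len < len' ∨ (len = len' ∧ y' ≤ y)) ∧
        determine_L3 L = some (pvWin L y' len')) := by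
  have h := outerA_range' L L.length 0 (by omega) (by omega)
    (fun y len hgood => by have := hgood.2.1; omega)
  rw [← List.range_eq_range'] at h
  exact h

-- ---------- characterisation of B ----------

-- the effect of one row's candidate on the running best
def pvUpd (L : List Int) (y : Nat) (b : Nat × Nat) (len : Nat) : Nat × Nat :=
  if pvGoodW L y len = true ∧ b.1 < len then (len, y) else b


theorem stepB_fold (L : List Int) (y : Nat) :
    ∀ (k : Nat) (b0 : Nat × Nat), y + 1 + k ≤ L.length →
    (List.range' (y + 1) k).foldl (determine_L3_stepB L y)
        (PySem.Set.ofList [L.getD y 0], L.getD y 0, L.getD y 0, b0.1, b0.2)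
    = (PySem.Set.ofList (pvWin L y (k + 1)),
       (pvWin L (y + 1) k).foldl min (L.getD y 0),
       (pvWin L (y + 1) k).foldl max (L.getD y 0),
       ((List.range' 2 k).foldl (pvUpd L y) b0).1,
       ((List.range' 2 k).foldl (pvUpd L y) b0).2) := by
  intro k
  induction k with
  | zero =>
    intro b0 hk
    simp [pvWin, List.range'_succ]
  | succ k ih =>
    intro b0 hk
    have hk' : y + 1 + k ≤ L.length := by omega
    rw [List.range'_concat, List.range'_concat, List.foldl_append, List.foldl_append,
      ih b0 hk']
    simp only [List.foldl_cons, List.foldl_nil]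
    have hv1 : L.getD (y + 1 + 1 * k) 0 = L.getD (y + (k + 1)) 0 := by
      congr 1; ring
    have hv2 : L.getD (y + 1 + 1 * k) 0 = L.getD (y + 1 + k) 0 := by
      congr 1; ring
    have hwin : pvWin L y (k + 1 + 1) = pvWin L y (k + 1) ++ [L.getD (y + 1 + 1 * k) 0] := by
      rw [pvWin_concat, hv1]
    have hwt : pvWin L (y + 1) (k + 1) = pvWin L (y + 1) k ++ [L.getD (y + 1 + 1 * k) 0] := by
      rw [pvWin_concat, hv2]
    have hwc : pvWin L y (k + 1) = L.getD y 0 :: pvWin L (y + 1) k := pvWin_cons L y k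
    have hmn' : (pvWin L (y + 1) (k + 1)).foldl min (L.getD y 0)
        = min ((pvWin L (y + 1) k).foldl min (L.getD y 0)) (L.getD (y + 1 + 1 * k) 0) := by
      rw [hwt, List.foldl_append, List.foldl_cons, List.foldl_nil]
    have hmx' : (pvWin L (y + 1) (k + 1)).foldl max (L.getD y 0)
        = max ((pvWin L (y + 1) k).foldl max (L.getD y 0)) (L.getD (y + 1 + 1 * k) 0) := by
      rw [hwt, List.foldl_append, List.foldl_cons, List.foldl_nil]
    have hdata :
        (if PySem.Set.contains (PySem.Set.ofList (pvWin L y (k + 1))) (L.getD (y + 1 + 1 * k) 0) then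
          (PySem.Set.ofList (pvWin L y (k + 1)),
           (pvWin L (y + 1) k).foldl min (L.getD y 0), (pvWin L (y + 1) k).foldl max (L.getD y 0))
         else
          (PySem.Set.add (PySem.Set.ofList (pvWin L y (k + 1))) (L.getD (y + 1 + 1 * k) 0),
           if L.getD (y + 1 + 1 * k) 0 < (pvWin L (y + 1) k).foldl min (L.getD y 0) then
             L.getD (y + 1 + 1 * k) 0 else (pvWin L (y + 1) k).foldl min (L.getD y 0),
           if L.getD (y + 1 + 1 * k) 0 > (pvWin L (y + 1) k).foldl max (L.getD y 0) then
             L.getD (y + 1 + 1 * k) 0 else (pvWin L (y + 1) k).foldl max (L.getD y 0)))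
        = (PySem.Set.ofList (pvWin L y (k + 1 + 1)),
           (pvWin L (y + 1) (k + 1)).foldl min (L.getD y 0),
           (pvWin L (y + 1) (k + 1)).foldl max (L.getD y 0)) := by
      have hminif : (if L.getD (y + 1 + 1 * k) 0 < (pvWin L (y + 1) k).foldl min (L.getD y 0) then
             L.getD (y + 1 + 1 * k) 0 else (pvWin L (y + 1) k).foldl min (L.getD y 0))
          = min ((pvWin L (y + 1) k).foldl min (L.getD y 0)) (L.getD (y + 1 + 1 * k) 0) := by
        rcases lt_or_ge (L.getD (y + 1 + 1 * k) 0) ((pvWin L (y + 1) k).foldl min (L.getD y 0)) with h' | h'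
        · rw [if_pos h', min_eq_right (le_of_lt h')]
        · rw [if_neg (not_lt.mpr h'), min_eq_left h']
      have hmaxif : (if L.getD (y + 1 + 1 * k) 0 > (pvWin L (y + 1) k).foldl max (L.getD y 0) then
             L.getD (y + 1 + 1 * k) 0 else (pvWin L (y + 1) k).foldl max (L.getD y 0))
          = max ((pvWin L (y + 1) k).foldl max (L.getD y 0)) (L.getD (y + 1 + 1 * k) 0) := by
        rcases lt_or_ge ((pvWin L (y + 1) k).foldl max (L.getD y 0)) (L.getD (y + 1 + 1 * k) 0) with h' | h'
        · rw [if_pos h', max_eq_right (le_of_lt h')]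
        · rw [if_neg (not_lt.mpr h'), max_eq_left h']
      rw [hwin, PySem.Set.ofList_append_singleton, hmn', hmx', hminif, hmaxif]
      by_cases hmem : L.getD (y + 1 + 1 * k) 0 ∈ pvWin L y (k + 1)
      · rw [if_pos (by rw [PySem.Set.contains_iff]; exact (PySem.Set.mem_ofList _ _).mpr hmem)]
        rw [PySem.Set.add_of_mem ((PySem.Set.mem_ofList _ _).mpr hmem)]
        have hmin : (pvWin L (y + 1) k).foldl min (L.getD y 0) ≤ L.getD (y + 1 + 1 * k) 0 := by
          rw [hwc] at hmem
          rcases List.mem_cons.mp hmem with heq | hmem'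
          · rw [heq]; exact (PySem.List.foldl_min_le _ _).1
          · exact (PySem.List.foldl_min_le _ _).2 _ hmem'
        have hmax : L.getD (y + 1 + 1 * k) 0 ≤ (pvWin L (y + 1) k).foldl max (L.getD y 0) := by
          rw [hwc] at hmem
          rcases List.mem_cons.mp hmem with heq | hmem'
          · rw [heq]; exact (PySem.List.le_foldl_max _ _).1
          · exact (PySem.List.le_foldl_max _ _).2 _ hmem'
        rw [min_eq_left hmin, max_eq_left hmax]
      · rw [if_neg (by rw [PySem.Set.contains_iff, PySem.Set.mem_ofList]; exact hmem)]
    -- now unfold one step of B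
    simp only [determine_L3_stepB]
    rw [hdata]
    have hcond : ((pvWin L (y + 1) (k + 1)).foldl max (L.getD y 0)
          - (pvWin L (y + 1) (k + 1)).foldl min (L.getD y 0)
          = PySem.Set.len (PySem.Set.ofList (pvWin L y (k + 1 + 1))) - 1)
        ↔ pvGoodW L y (k + 1 + 1) = true := by
      rw [pvGoodW.eq_def, pvWin_cons L y (k + 1)]
      simp [PySem.Set.len]
    have hlen2 : y + 1 + 1 * k - y + 1 = k + 2 := by omega
    have h2k : 2 + 1 * k = k + 2 := by omega
    by_cases hgood : pvGoodW L y (k + 1 + 1) = true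
    · rw [if_pos (hcond.mpr hgood)]
      rw [hlen2]
      by_cases hbl : ((List.range' 2 k).foldl (pvUpd L y) b0).1 < k + 2
      · rw [if_pos hbl]
        have hval : pvUpd L y ((List.range' 2 k).foldl (pvUpd L y) b0) (2 + 1 * k)
            = (k + 2, y) := by
          rw [pvUpd, if_pos ⟨by rw [h2k]; exact hgood, by rw [h2k]; exact hbl⟩, h2k]
        rw [hval]
      · rw [if_neg hbl]
        have hval : pvUpd L y ((List.range' 2 k).foldl (pvUpd L y) b0) (2 + 1 * k)
            = (List.range' 2 k).foldl (pvUpd L y) b0 := by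
          rw [pvUpd, if_neg]
          rintro ⟨-, hc⟩
          rw [h2k] at hc
          exact hbl hc
        rw [hval]
    · rw [if_neg (fun hc => hgood (hcond.mp hc))]
      have hval : pvUpd L y ((List.range' 2 k).foldl (pvUpd L y) b0) (2 + 1 * k)
          = (List.range' 2 k).foldl (pvUpd L y) b0 := by
        rw [pvUpd, if_neg]
        rintro ⟨hg, -⟩
        rw [h2k] at hg
        exact hgood hg
      rw [hval]

theorem rowB_eq (L : List Int) (y : Nat) (hy : y < L.length) (b : Nat × Nat) :
    determine_L3_rowB L b y = (List.range' 2 (L.length - (y + 1))).foldl (pvUpd L y) b := by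
  unfold determine_L3_rowB
  simp only []
  rw [stepB_fold L y (L.length - (y + 1)) b (by omega)]

theorem pvUpd_mono (L : List Int) (y : Nat) :
    ∀ (lens : List Nat) (b : Nat × Nat), b.1 ≤ (lens.foldl (pvUpd L y) b).1 := by
  intro lens
  induction lens with
  | nil => intro b; simp
  | cons len rest ih =>
    intro b
    have h1 : b.1 ≤ (pvUpd L y b len).1 := by
      unfold pvUpd
      split_ifs with h
      · have := h.2
        simp
        omega
      · simp
    calc b.1 ≤ (pvUpd L y b len).1 := h1
      _ ≤ _ := ih _

theorem pvUpd_cases (L : List Int) (y : Nat) :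
    ∀ (lens : List Nat) (b : Nat × Nat),
      lens.foldl (pvUpd L y) b = b ∨
      ((lens.foldl (pvUpd L y) b).2 = y ∧
        pvGoodW L y (lens.foldl (pvUpd L y) b).1 = true ∧
        b.1 < (lens.foldl (pvUpd L y) b).1 ∧ (lens.foldl (pvUpd L y) b).1 ∈ lens) := by
  intro lens
  induction lens with
  | nil => intro b; left; rfl
  | cons len rest ih =>
    intro b
    simp only [List.foldl_cons]
    rcases ih (pvUpd L y b len) with heq | ⟨h2, hg, hlt, hmem⟩
    · rw [heq]
      unfold pvUpd
      split_ifs with h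
      · right; exact ⟨rfl, h.1, h.2, by simp⟩
      · left; rfl
    · right
      refine ⟨h2, hg, ?_, List.mem_cons_of_mem _ hmem⟩
      have h1 : b.1 ≤ (pvUpd L y b len).1 := by
        unfold pvUpd
        split_ifs with h
        · have := h.2
          simp
          omega
        · simp
      omega

theorem pvUpd_cover (L : List Int) (y : Nat) :
    ∀ (lens : List Nat) (b : Nat × Nat) (len : Nat), len ∈ lens → pvGoodW L y len = true →
      len ≤ (lens.foldl (pvUpd L y) b).1 := by
  intro lens
  induction lens with
  | nil => intro b len h; cases h
  | cons len0 rest ih =>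
    intro b len hmem hg
    simp only [List.foldl_cons]
    rcases List.mem_cons.mp hmem with rfl | hmem'
    · have h1 : len ≤ (pvUpd L y b len).1 := by
        unfold pvUpd
        split_ifs with h
        · simp
        · simp only [not_and, not_lt] at h; exact h hg
      exact le_trans h1 (pvUpd_mono L y rest _)
    · exact ih _ _ hmem' hg

-- invariant of B's outer loop after the rows y < m have been processed
def pvInv (L : List Int) (m : Nat) (r : Nat × Nat) : Prop :=
  (r = (0, 0) ∧ ∀ y len, y < m → ¬ pvGood L y len)
  ∨ (pvGood L r.2 r.1 ∧ r.2 < m ∧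
      ∀ y len, y < m → pvGood L y len → len < r.1 ∨ (len = r.1 ∧ r.2 ≤ y))

theorem rowB_inv (L : List Int) (m : Nat) (hm : m < L.length) (r : Nat × Nat)
    (h : pvInv L m r) : pvInv L (m + 1) (determine_L3_rowB L r m) := by
  rw [rowB_eq L m hm r]
  have hmemlens : ∀ len, pvGood L m len → len ∈ List.range' 2 (L.length - (m + 1)) := by
    intro len ⟨h2, hle, _⟩
    rw [List.mem_range'_1]
    omega
  have hboundlens : ∀ len ∈ List.range' 2 (L.length - (m + 1)), 2 ≤ len ∧ m + len ≤ L.length := by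
    intro len hmem
    rw [List.mem_range'_1] at hmem
    omega
  have hcover : ∀ len, pvGood L m len →
      len ≤ ((List.range' 2 (L.length - (m + 1))).foldl (pvUpd L m) r).1 := by
    intro len hgood
    exact pvUpd_cover L m _ r len (hmemlens len hgood) hgood.2.2
  have hmono := pvUpd_mono L m (List.range' 2 (L.length - (m + 1))) r
  rcases pvUpd_cases L m (List.range' 2 (L.length - (m + 1))) r with heq | ⟨h2, hgw, hlt2, hmem⟩
  · rw [heq]
    rcases h with ⟨rfl, hno⟩ | ⟨hg, hlt, hopt⟩
    · left
      refine ⟨rfl, fun y len hy hgood => ?_⟩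
      rcases Nat.lt_succ_iff_lt_or_eq.mp hy with hy' | rfl
      · exact hno y len hy' hgood
      · have := hcover len hgood; rw [heq] at this; have := hgood.1; omega
    · right
      refine ⟨hg, by omega, fun y len hy hgood => ?_⟩
      rcases Nat.lt_succ_iff_lt_or_eq.mp hy with hy' | rfl
      · exact hopt y len hy' hgood
      · have := hcover len hgood; rw [heq] at this
        rcases Nat.lt_or_ge len r.1 with h' | h'
        · exact Or.inl h'
        · exact Or.inr ⟨by omega, by omega⟩
  · set r' := (List.range' 2 (L.length - (m + 1))).foldl (pvUpd L m) r with hr'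
    right
    have hb := hboundlens r'.1 hmem
    refine ⟨⟨hb.1, by rw [h2]; exact hb.2, h2 ▸ hgw⟩, by omega, fun y len hy hgood => ?_⟩
    rcases Nat.lt_succ_iff_lt_or_eq.mp hy with hy' | rfl
    · rcases h with ⟨rfl, hno⟩ | ⟨hg, hlt, hopt⟩
      · exact absurd hgood (hno y len hy')
      · rcases hopt y len hy' hgood with h' | ⟨h', _⟩
        · exact Or.inl (by omega)
        · exact Or.inl (by omega)
    · have := hcover len hgood
      rcases Nat.lt_or_ge len r'.1 with h' | h'
      · exact Or.inl h'
      · exact Or.inr ⟨by omega, by omega⟩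

theorem outerB_inv (L : List Int) :
    pvInv L L.length ((List.range L.length).foldl (determine_L3_rowB L) (0, 0)) := by
  have key : ∀ m, m ≤ L.length → pvInv L m ((List.range m).foldl (determine_L3_rowB L) (0, 0)) := by
    intro m
    induction m with
    | zero => intro _; left; exact ⟨rfl, by omega⟩
    | succ m ih =>
      intro hm
      rw [List.range_succ, List.foldl_append, List.foldl_cons, List.foldl_nil]
      exact rowB_inv L m (by omega) _ (ih (by omega))
  exact key L.length le_rfl

theorem good_y_lt (L : List Int) {y len : Nat} (h : pvGood L y len) : y < L.length := by
  rcases h with ⟨h2, hle, _⟩; omega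

-- ===== VERDICT (by name: the statement is the Claim_ definition above) =====
theorem determine_L3_spec : Claim_equal_determine_L3 := by
  intro L _
  show determine_L3 L = determine_L3_alt L
  have hB := outerB_inv L
  rcases charA L with ⟨hA, hno⟩ | ⟨y', len', hg, hopt, hA⟩
  · rw [hA]
    rcases hB with ⟨hr, _⟩ | ⟨hg, _, _⟩
    · simp [determine_L3_alt, hr]
    · exact absurd hg (hno _ _)
  · rw [hA]
    rcases hB with ⟨_, hnone⟩ | ⟨hgr, _, hoptB⟩
    · exact absurd hg (hnone _ _ (good_y_lt L hg))
    · set r := (List.range L.length).foldl (determine_L3_rowB L) (0, 0) with hrdef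
      have h1 := hoptB _ _ (good_y_lt L hg) hg
      have h2 := hopt _ _ hgr
      have hlen : len' = r.1 := by omega
      have hy : y' = r.2 := by omega
      rcases hgr with ⟨hr2, hrle, _⟩
      have hne : r.1 ≠ 0 := by omega
      simp only [determine_L3_alt, hrdef.symm] at *
      rw [if_neg hne, slice_eq_win L r.2 r.1 hrle, hlen, hy]
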